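-- pv_equiv track=rewrite | github.com/ipposk/arnold-fitness-platform | arnold-fitness/arnold-fitness-backend/src/conversational/prompting/tone_adjuster.py | _simplify_technical_language
-- ===== SOURCE A (Python) =====
-- def _simplify_technical_language(response: str) -> str:
--     """Semplifica il linguaggio tecnico"""
--
--     simplifications = {
--         "macronutrienti": "nutrienti principali (proteine, carboidrati, grassi)",
--         "deficit calorico": "mangiare meno calorie di quelle che bruci",
--         "metabolismo basale": "energia che il corpo usa a riposo",
--         "indice glicemico": "velocità con cui un cibo alza la glicemia",
--         "composizione corporea": "rapporto tra muscoli e grasso"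
--     }
--
--     for technical, simple in simplifications.items():
--         response = response.replace(technical, simple)
--
--     return response
-- ===== SOURCE B (Python) =====
-- import re
--
--
-- def _simplify_technical_language(response: str) -> str:
--     """Semplifica il linguaggio tecnico"""
--
--     simplifications = {
--         "macronutrienti": "nutrienti principali (proteine, carboidrati, grassi)",
--         "deficit calorico": "mangiare meno calorie di quelle che bruci",
--         "metabolismo basale": "energia che il corpo usa a riposo",
--         "indice glicemico": "velocità con cui un cibo alza la glicemia",
--         "composizione corporea": "rapporto tra muscoli e grasso"
--     }
--
--     pattern = re.compile("|".join(map(re.escape, simplifications)))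
--     return pattern.sub(lambda m: simplifications[m.group(0)], response)
-- ===== Notes on version B (the rewrite author's own statement) =====
-- stated objective: idiomatic
-- what changed: Replaces five sequential full-text str.replace passes with one compiled regex alternation over the dictionary keys and a single re.sub pass whose replacement function looks the matched key up in the dict.
-- intended difference: On inputs containing the substring 'deficit caloricondice glicemico', A's sequential replacement cascades (replacing 'deficit calorico' yields text ending '...bruci' whose final 'i' completes 'indice glicemico', which A's later pass then also replaces), while B's single pass never re-matches inserted text and leaves 'ndice glicemico' untouched, which is the intended replace-the-original-terms-once behaviour. — e.g. on _simplify_technical_language("deficit caloricondice glicemico"): A returns "mangiare meno calorie di quelle che brucvelocità con cui un cibo alza la glicemia", B returns "mangiare meno calorie di quelle che brucindice glicemico"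
import Mathlib
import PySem

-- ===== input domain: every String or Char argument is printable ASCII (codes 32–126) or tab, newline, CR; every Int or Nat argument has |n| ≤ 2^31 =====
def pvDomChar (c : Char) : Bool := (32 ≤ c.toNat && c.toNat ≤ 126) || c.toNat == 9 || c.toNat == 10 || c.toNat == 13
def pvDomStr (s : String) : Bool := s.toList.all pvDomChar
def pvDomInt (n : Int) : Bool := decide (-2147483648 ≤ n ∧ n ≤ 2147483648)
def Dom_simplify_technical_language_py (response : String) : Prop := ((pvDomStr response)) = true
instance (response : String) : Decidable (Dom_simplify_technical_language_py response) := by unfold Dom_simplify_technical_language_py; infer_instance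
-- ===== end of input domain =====

set_option maxRecDepth 8192
set_option maxHeartbeats 1000000

-- B replaces A's five sequential str.replace passes by ONE regex-alternation pass (re.sub with a
-- dict lookup on the match); equivalence is proved outside D_, the inputs on which A's
-- sequential replacing cascades into text it inserted itself.

-- ===== PORT A =====
-- the 'for technical, simple in simplifications.items()' loop = a fold over the dict's items
def simplify_technical_language_py (response : String) : String :=
  [("macronutrienti", "nutrienti principali (proteine, carboidrati, grassi)"),
   ("deficit calorico", "mangiare meno calorie di quelle che bruci"),
   ("metabolismo basale", "energia che il corpo usa a riposo"),
   ("indice glicemico", "velocità con cui un cibo alza la glicemia"),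
   ("composizione corporea", "rapporto tra muscoli e grasso")].foldl
    (fun resp ts => PySem.Str.replace resp ts.1 ts.2) response

-- ===== PORT B =====
-- Source B compiles re.compile("|".join(map(re.escape, simplifications))) and does ONE pattern.sub
-- pass, looking the matched key up in the dict.  The regex machinery is ported by hand, exactly:
-- at each position the engine tries the five alternatives in dict order; on a match it emits
-- simplifications[key] and resumes after the matched text (keys are their own re.escape, and the
-- lambda returns the dict value for the matched alternative); otherwise it copies one character.
abbrev pvK1 : List Char := ['m', 'a', 'c', 'r', 'o', 'n', 'u', 't', 'r', 'i', 'e', 'n', 't', 'i']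
abbrev pvK2 : List Char := ['d', 'e', 'f', 'i', 'c', 'i', 't', ' ', 'c', 'a', 'l', 'o', 'r', 'i', 'c', 'o']
abbrev pvK3 : List Char := ['m', 'e', 't', 'a', 'b', 'o', 'l', 'i', 's', 'm', 'o', ' ', 'b', 'a', 's', 'a', 'l', 'e']
abbrev pvK4 : List Char := ['i', 'n', 'd', 'i', 'c', 'e', ' ', 'g', 'l', 'i', 'c', 'e', 'm', 'i', 'c', 'o']
abbrev pvK5 : List Char := ['c', 'o', 'm', 'p', 'o', 's', 'i', 'z', 'i', 'o', 'n', 'e', ' ', 'c', 'o', 'r', 'p', 'o', 'r', 'e', 'a']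
abbrev pvV1 : List Char := ['n', 'u', 't', 'r', 'i', 'e', 'n', 't', 'i', ' ', 'p', 'r', 'i', 'n', 'c', 'i', 'p', 'a', 'l', 'i', ' ', '(', 'p', 'r', 'o', 't', 'e', 'i', 'n', 'e', ',', ' ', 'c', 'a', 'r', 'b', 'o', 'i', 'd', 'r', 'a', 't', 'i', ',', ' ', 'g', 'r', 'a', 's', 's', 'i', ')']
abbrev pvV2 : List Char := ['m', 'a', 'n', 'g', 'i', 'a', 'r', 'e', ' ', 'm', 'e', 'n', 'o', ' ', 'c', 'a', 'l', 'o', 'r', 'i', 'e', ' ', 'd', 'i', ' ', 'q', 'u', 'e', 'l', 'l', 'e', ' ', 'c', 'h', 'e', ' ', 'b', 'r', 'u', 'c', 'i']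
abbrev pvV3 : List Char := ['e', 'n', 'e', 'r', 'g', 'i', 'a', ' ', 'c', 'h', 'e', ' ', 'i', 'l', ' ', 'c', 'o', 'r', 'p', 'o', ' ', 'u', 's', 'a', ' ', 'a', ' ', 'r', 'i', 'p', 'o', 's', 'o']
abbrev pvV4 : List Char := ['v', 'e', 'l', 'o', 'c', 'i', 't', 'à', ' ', 'c', 'o', 'n', ' ', 'c', 'u', 'i', ' ', 'u', 'n', ' ', 'c', 'i', 'b', 'o', ' ', 'a', 'l', 'z', 'a', ' ', 'l', 'a', ' ', 'g', 'l', 'i', 'c', 'e', 'm', 'i', 'a']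
abbrev pvV5 : List Char := ['r', 'a', 'p', 'p', 'o', 'r', 't', 'o', ' ', 't', 'r', 'a', ' ', 'm', 'u', 's', 'c', 'o', 'l', 'i', ' ', 'e', ' ', 'g', 'r', 'a', 's', 's', 'o']

-- (the remaining input's length is the scan's fuel, as in PySem.Chars.replace.go: it only
-- makes the same left-to-right scan structurally total, the computation is unchanged)
def pvBGo : Nat → List Char → List Char
  | 0, _ => []
  | _ + 1, [] => []
  | fuel + 1, c :: t =>
    if pvK1.isPrefixOf (c :: t) then pvV1 ++ pvBGo fuel ((c :: t).drop 14)
    else if pvK2.isPrefixOf (c :: t) then pvV2 ++ pvBGo fuel ((c :: t).drop 16)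
    else if pvK3.isPrefixOf (c :: t) then pvV3 ++ pvBGo fuel ((c :: t).drop 18)
    else if pvK4.isPrefixOf (c :: t) then pvV4 ++ pvBGo fuel ((c :: t).drop 16)
    else if pvK5.isPrefixOf (c :: t) then pvV5 ++ pvBGo fuel ((c :: t).drop 21)
    else c :: pvBGo fuel t

def pvBSub (cs : List Char) : List Char := pvBGo cs.length cs

def simplify_technical_language_py_alt (response : String) : String :=
  String.ofList (pvBSub response.toList)

-- ===== PRECONDITION & SPEC =====
-- On inputs containing 'deficit caloricondice glicemico', A's sequential replacement cascades
-- (replacing 'deficit calorico' yields '...bruci', whose final 'i' completes 'indice glicemico',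
-- which A's later pass replaces too), while B's single pass never re-matches inserted text and
-- leaves 'ndice glicemico' untouched — the intended replace-the-original-terms-once behaviour.
def D_simplify_technical_language_py (response : String) : Prop :=
  PySem.Str.isIn "deficit caloricondice glicemico" response = true
instance (response : String) : Decidable (D_simplify_technical_language_py response) := by
  unfold D_simplify_technical_language_py; infer_instance

def Spec_simplify_technical_language_py (response : String) (out : String) : Prop :=
  ¬ D_simplify_technical_language_py response → out = simplify_technical_language_py_alt response
instance (response : String) (out : String) : Decidable (Spec_simplify_technical_language_py response out) := by
  unfold Spec_simplify_technical_language_py; infer_instance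

def pvDiffWitness_simplify_technical_language_py : String := "deficit caloricondice glicemico"
def pvDiffWitnessOut_simplify_technical_language_py : String × String :=
  ("mangiare meno calorie di quelle che brucvelocità con cui un cibo alza la glicemia",
   "mangiare meno calorie di quelle che brucindice glicemico")

-- ===== CLAIM (what is proved, stated in full; the proofs are below) =====
def Claim_unchanged_simplify_technical_language_py : Prop := ∀ (response : String), Dom_simplify_technical_language_py response → Spec_simplify_technical_language_py response (simplify_technical_language_py response)
def Claim_exact_simplify_technical_language_py : Prop := ∀ (response : String), Dom_simplify_technical_language_py response → D_simplify_technical_language_py response → simplify_technical_language_py response ≠ simplify_technical_language_py_alt response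
def Claim_changed_simplify_technical_language_py : Prop := Dom_simplify_technical_language_py (pvDiffWitness_simplify_technical_language_py) ∧ D_simplify_technical_language_py (pvDiffWitness_simplify_technical_language_py) ∧ simplify_technical_language_py (pvDiffWitness_simplify_technical_language_py) = pvDiffWitnessOut_simplify_technical_language_py.1 ∧ simplify_technical_language_py_alt (pvDiffWitness_simplify_technical_language_py) = pvDiffWitnessOut_simplify_technical_language_py.2 ∧ pvDiffWitnessOut_simplify_technical_language_py.1 ≠ pvDiffWitnessOut_simplify_technical_language_py.2

-- ===== LEMMAS AND PROOFS =====

-- 'ndice glicemico' (= "indice glicemico" minus its first letter) and the cascade substring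
abbrev pvP : List Char := ['n', 'd', 'i', 'c', 'e', ' ', 'g', 'l', 'i', 'c', 'e', 'm', 'i', 'c', 'o']
abbrev pvMagic : List Char := pvK2 ++ pvP
-- pvV2 minus its final 'i'
abbrev pvV2HD : List Char := ['m', 'a', 'n', 'g', 'i', 'a', 'r', 'e', ' ', 'm', 'e', 'n', 'o', ' ', 'c', 'a', 'l', 'o', 'r', 'i', 'e', ' ', 'd', 'i', ' ', 'q', 'u', 'e', 'l', 'l', 'e', ' ', 'c', 'h', 'e', ' ', 'b', 'r', 'u', 'c']

-- a prefix of an append starts inside the left part or covers it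
lemma pv_prefix_append_cases {x y z : List Char} (h : x <+: y ++ z) : x <+: y ∨ y <+: x := by
  rcases h with ⟨r, hr⟩
  rcases List.append_eq_append_iff.mp hr.symm with ⟨a, ha1, _⟩ | ⟨a, ha1, _⟩
  · right; exact ⟨a, ha1.symm⟩
  · left; exact ⟨a, ha1.symm⟩

-- 'k never matches at a position strictly inside v, whatever follows v'
abbrev pvClean (v k : List Char) : Prop :=
  ∀ j, j < v.length → ¬ (k <+: v.drop j) ∧ ¬ (v.drop j <+: k)

-- the accumulator/fuel worker of PySem.Chars.replace, characterised
lemma pv_go_eq (k w : List Char) (hk : k ≠ []) :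
    ∀ (fuel : Nat) (l acc : List Char), l.length ≤ fuel →
      PySem.Chars.replace.go k w fuel l acc = acc.reverse ++ PySem.Chars.replace l k w := by
  intro fuel
  induction fuel using Nat.strong_induction_on with
  | _ fuel ih =>
  intro l acc hl
  cases fuel with
  | zero =>
    have hl0 : l = [] := by cases l with
      | nil => rfl
      | cons a b => simp at hl
    subst hl0
    simp [PySem.Chars.replace.go, PySem.Chars.replace, List.isEmpty_iff, hk]
  | succ n =>
    cases l with
    | nil => simp [PySem.Chars.replace.go, PySem.Chars.replace, List.isEmpty_iff, hk]
    | cons c t =>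
      have hkl : 1 ≤ k.length := by
        cases k with
        | nil => exact absurd rfl hk
        | cons a b => simp
      have hrep : PySem.Chars.replace (c :: t) k w
          = PySem.Chars.replace.go k w (t.length + 1) (c :: t) [] := by
        simp [PySem.Chars.replace, List.isEmpty_iff, hk]
      have hlt : t.length ≤ n := by simp at hl; omega
      have hdl : (List.drop k.length (c :: t)).length ≤ n := by
        simp [List.length_drop]; omega
      have hdl' : (List.drop k.length (c :: t)).length ≤ t.length := by
        simp [List.length_drop]; omega
      by_cases hp : k.isPrefixOf (c :: t)
      · rw [show PySem.Chars.replace.go k w (n + 1) (c :: t) acc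
            = PySem.Chars.replace.go k w n (List.drop k.length (c :: t)) (w.reverse ++ acc) from by
              simp [PySem.Chars.replace.go, hp]]
        rw [ih n (by omega) _ _ hdl, hrep]
        rw [show PySem.Chars.replace.go k w (t.length + 1) (c :: t) []
            = PySem.Chars.replace.go k w t.length (List.drop k.length (c :: t)) (w.reverse ++ []) from by
              simp [PySem.Chars.replace.go, hp]]
        rw [ih t.length (by omega) _ _ hdl']
        simp
      · rw [show PySem.Chars.replace.go k w (n + 1) (c :: t) acc
            = PySem.Chars.replace.go k w n t (c :: acc) from by
              simp [PySem.Chars.replace.go, hp]]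
        rw [ih n (by omega) _ _ hlt, hrep]
        rw [show PySem.Chars.replace.go k w (t.length + 1) (c :: t) []
            = PySem.Chars.replace.go k w t.length t (c :: []) from by
              simp [PySem.Chars.replace.go, hp]]
        rw [ih t.length (by omega) _ _ le_rfl]
        simp

lemma pv_replace_nil (k w : List Char) (hk : k ≠ []) : PySem.Chars.replace [] k w = [] := by
  simp [PySem.Chars.replace, List.isEmpty_iff, hk, PySem.Chars.replace.go]

lemma pv_replace_pos (k w s : List Char) (hk : k ≠ []) (h : k <+: s) :
    PySem.Chars.replace s k w = w ++ PySem.Chars.replace (s.drop k.length) k w := by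
  cases s with
  | nil =>
    have : k = [] := List.prefix_nil.mp h
    exact absurd this hk
  | cons c t =>
    have hkl : 1 ≤ k.length := by
      cases k with
      | nil => exact absurd rfl hk
      | cons a b => simp
    have hp : k.isPrefixOf (c :: t) := List.isPrefixOf_iff_prefix.mpr h
    rw [show PySem.Chars.replace (c :: t) k w
        = PySem.Chars.replace.go k w (t.length + 1) (c :: t) [] from by
          simp [PySem.Chars.replace, List.isEmpty_iff, hk]]
    rw [show PySem.Chars.replace.go k w (t.length + 1) (c :: t) []
        = PySem.Chars.replace.go k w t.length (List.drop k.length (c :: t)) (w.reverse ++ []) from by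
          simp [PySem.Chars.replace.go, hp]]
    rw [pv_go_eq k w hk t.length _ _ (by simp [List.length_drop]; omega)]
    simp

lemma pv_replace_neg (k w : List Char) (c : Char) (t : List Char) (hk : k ≠ [])
    (h : ¬ k <+: (c :: t)) :
    PySem.Chars.replace (c :: t) k w = c :: PySem.Chars.replace t k w := by
  have hp : ¬ k.isPrefixOf (c :: t) := fun hb => h (List.isPrefixOf_iff_prefix.mp hb)
  rw [show PySem.Chars.replace (c :: t) k w
      = PySem.Chars.replace.go k w (t.length + 1) (c :: t) [] from by
        simp [PySem.Chars.replace, List.isEmpty_iff, hk]]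
  rw [show PySem.Chars.replace.go k w (t.length + 1) (c :: t) []
      = PySem.Chars.replace.go k w t.length t (c :: []) from by
        simp [PySem.Chars.replace.go, hp]]
  rw [pv_go_eq k w hk t.length t _ le_rfl]
  simp

lemma pv_replace_append_no_cross (k w : List Char) (hk : k ≠ []) :
    ∀ (v t : List Char), (∀ j, j < v.length → ¬ k <+: (v.drop j ++ t)) →
      PySem.Chars.replace (v ++ t) k w = v ++ PySem.Chars.replace t k w := by
  intro v
  induction v with
  | nil => intro t _; simp
  | cons c v' ih =>
    intro t h
    have h0 : ¬ k <+: (c :: (v' ++ t)) := by simpa using h 0 (by simp)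
    rw [show (c :: v') ++ t = c :: (v' ++ t) from rfl, pv_replace_neg k w c (v' ++ t) hk h0,
      ih t (fun j hj => by simpa using h (j + 1) (by simpa using hj))]
    simp

lemma pv_replace_append_clean (k w v t : List Char) (hk : k ≠ []) (hc : pvClean v k) :
    PySem.Chars.replace (v ++ t) k w = v ++ PySem.Chars.replace t k w := by
  refine pv_replace_append_no_cross k w hk v t (fun j hj h => ?_)
  rcases pv_prefix_append_cases h with h' | h'
  · exact (hc j hj).1 h'
  · exact (hc j hj).2 h'

-- a (suffix of a) pattern k' that is a prefix of the replaced string was already one of the input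
lemma pv_emerge (k w k' : List Char) (hk : k ≠ []) (hc : pvClean k' w) :
    ∀ (n : Nat) (u : List Char), u.length ≤ n → ∀ p, p < k'.length →
      k'.drop p <+: PySem.Chars.replace u k w → k'.drop p <+: u := by
  intro n
  induction n with
  | zero =>
    intro u hu p hp hpre
    have hu0 : u = [] := by cases u with
      | nil => rfl
      | cons a b => simp at hu
    subst hu0
    rw [pv_replace_nil k w hk] at hpre
    rw [List.prefix_nil.mp hpre]
  | succ n ih =>
    intro u hu p hp hpre
    cases u with
    | nil =>
      rw [pv_replace_nil k w hk] at hpre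
      rw [List.prefix_nil.mp hpre]
    | cons c t =>
      have hlt : t.length ≤ n := by simp at hu; omega
      by_cases hm : k <+: (c :: t)
      · rw [pv_replace_pos k w _ hk hm] at hpre
        rcases pv_prefix_append_cases hpre with h' | h'
        · exact absurd h' (hc p hp).2
        · exact absurd h' (hc p hp).1
      · rw [pv_replace_neg k w c t hk hm] at hpre
        have hd := List.drop_eq_getElem_cons hp
        rw [hd, List.cons_prefix_cons] at hpre
        obtain ⟨hc1, h2⟩ := hpre
        by_cases hp1 : p + 1 < k'.length
        · have := ih t hlt (p + 1) hp1 h2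
          rw [hd, List.cons_prefix_cons]
          exact ⟨hc1, this⟩
        · have h0 : k'.drop (p + 1) = [] := List.drop_eq_nil_of_le (by omega)
          rw [hd, List.cons_prefix_cons]
          exact ⟨hc1, h0 ▸ List.nil_prefix⟩

lemma pv_emerge0 (k w k' : List Char) (hk : k ≠ []) (hk' : k' ≠ []) (hc : pvClean k' w)
    (u : List Char) (h : k' <+: PySem.Chars.replace u k w) : k' <+: u := by
  have h0 : 0 < k'.length := by
    cases k' with
    | nil => exact absurd rfl hk'
    | cons a l => simp
  have := pv_emerge k w k' hk hc u.length u le_rfl 0 h0 (by simpa using h)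
  simpa using this

lemma pv_npcr (k w k' : List Char) (hk : k ≠ []) (hk' : k' ≠ []) (hc : pvClean k' w)
    (c : Char) (u : List Char) (h : ¬ k' <+: (c :: u)) :
    ¬ k' <+: (c :: PySem.Chars.replace u k w) := by
  intro hpre
  obtain ⟨a, k'', rfl⟩ := List.exists_cons_of_ne_nil hk'
  rw [List.cons_prefix_cons] at hpre
  obtain ⟨rfl, h2⟩ := hpre
  cases k'' with
  | nil => exact h (by simp [List.cons_prefix_cons])
  | cons b l =>
    have h1lt : 1 < (a :: b :: l).length := by simp
    have := pv_emerge k w (a :: b :: l) hk hc u.length u le_rfl 1 h1lt (by simpa using h2)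
    refine h ?_
    rw [List.cons_prefix_cons]
    exact ⟨rfl, by simpa using this⟩

-- A's whole pipeline on the char level
abbrev pvA (cs : List Char) : List Char :=
  PySem.Chars.replace (PySem.Chars.replace (PySem.Chars.replace (PySem.Chars.replace
    (PySem.Chars.replace cs pvK1 pvV1) pvK2 pvV2) pvK3 pvV3) pvK4 pvV4) pvK5 pvV5

lemma pv_nil_case : pvA [] = pvBSub [] := by
  rw [show pvA [] = [] from by
    unfold pvA
    rw [pv_replace_nil pvK1 pvV1 (by decide), pv_replace_nil pvK2 pvV2 (by decide),
      pv_replace_nil pvK3 pvV3 (by decide), pv_replace_nil pvK4 pvV4 (by decide),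
      pv_replace_nil pvK5 pvV5 (by decide)]]
  rfl

-- ===== what A does to a block at the front of the string =====

lemma pv_stepA1 (t : List Char) : pvA (pvK1 ++ t) = pvV1 ++ pvA t := by
  unfold pvA
  have e1 : PySem.Chars.replace (pvK1 ++ t) pvK1 pvV1
      = pvV1 ++ PySem.Chars.replace t pvK1 pvV1 := by
    rw [pv_replace_pos pvK1 pvV1 _ (by decide) (List.prefix_append _ _), List.drop_left]
  rw [e1,
    pv_replace_append_clean pvK2 pvV2 pvV1 _ (by decide) (by decide),
    pv_replace_append_clean pvK3 pvV3 pvV1 _ (by decide) (by decide),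
    pv_replace_append_clean pvK4 pvV4 pvV1 _ (by decide) (by decide),
    pv_replace_append_clean pvK5 pvV5 pvV1 _ (by decide) (by decide)]

lemma pv_stepA2 (t : List Char) (hP : ¬ (pvP <+: t)) : pvA (pvK2 ++ t) = pvV2 ++ pvA t := by
  unfold pvA
  have hPX : ¬ (pvP <+: PySem.Chars.replace (PySem.Chars.replace
      (PySem.Chars.replace t pvK1 pvV1) pvK2 pvV2) pvK3 pvV3) := by
    intro hp
    have s3 := pv_emerge0 pvK3 pvV3 pvP (by decide) (by decide) (by decide) _ hp
    have s2 := pv_emerge0 pvK2 pvV2 pvP (by decide) (by decide) (by decide) _ s3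
    have s1 := pv_emerge0 pvK1 pvV1 pvP (by decide) (by decide) (by decide) _ s2
    exact hP s1
  have e1 : PySem.Chars.replace (pvK2 ++ t) pvK1 pvV1
      = pvK2 ++ PySem.Chars.replace t pvK1 pvV1 :=
    pv_replace_append_clean pvK1 pvV1 pvK2 _ (by decide) (by decide)
  have e2 : ∀ X, PySem.Chars.replace (pvK2 ++ X) pvK2 pvV2
      = pvV2 ++ PySem.Chars.replace X pvK2 pvV2 := by
    intro X
    rw [pv_replace_pos pvK2 pvV2 _ (by decide) (List.prefix_append _ _), List.drop_left]
  have e4 : ∀ Z, ¬ (pvP <+: Z) → PySem.Chars.replace (pvV2 ++ Z) pvK4 pvV4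
      = pvV2 ++ PySem.Chars.replace Z pvK4 pvV4 := by
    intro Z hZ
    have hnp : ¬ (pvK4 <+: ('i' :: Z)) := by
      intro hcon
      rw [show pvK4 = 'i' :: pvP from rfl, List.cons_prefix_cons] at hcon
      exact hZ hcon.2
    rw [show pvV2 = pvV2HD ++ ['i'] from rfl, List.append_assoc,
      pv_replace_append_clean pvK4 pvV4 pvV2HD _ (by decide) (by decide),
      show ['i'] ++ Z = 'i' :: Z from rfl,
      pv_replace_neg pvK4 pvV4 'i' Z (by decide) hnp]
    simp
  rw [e1, e2 _,
    pv_replace_append_clean pvK3 pvV3 pvV2 _ (by decide) (by decide),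
    e4 _ hPX,
    pv_replace_append_clean pvK5 pvV5 pvV2 _ (by decide) (by decide)]

lemma pv_stepA3 (t : List Char) : pvA (pvK3 ++ t) = pvV3 ++ pvA t := by
  unfold pvA
  have e3 : ∀ X, PySem.Chars.replace (pvK3 ++ X) pvK3 pvV3
      = pvV3 ++ PySem.Chars.replace X pvK3 pvV3 := by
    intro X
    rw [pv_replace_pos pvK3 pvV3 _ (by decide) (List.prefix_append _ _), List.drop_left]
  rw [pv_replace_append_clean pvK1 pvV1 pvK3 _ (by decide) (by decide),
    pv_replace_append_clean pvK2 pvV2 pvK3 _ (by decide) (by decide),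
    e3 _,
    pv_replace_append_clean pvK4 pvV4 pvV3 _ (by decide) (by decide),
    pv_replace_append_clean pvK5 pvV5 pvV3 _ (by decide) (by decide)]

lemma pv_stepA4 (t : List Char) : pvA (pvK4 ++ t) = pvV4 ++ pvA t := by
  unfold pvA
  have e4 : ∀ X, PySem.Chars.replace (pvK4 ++ X) pvK4 pvV4
      = pvV4 ++ PySem.Chars.replace X pvK4 pvV4 := by
    intro X
    rw [pv_replace_pos pvK4 pvV4 _ (by decide) (List.prefix_append _ _), List.drop_left]
  rw [pv_replace_append_clean pvK1 pvV1 pvK4 _ (by decide) (by decide),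
    pv_replace_append_clean pvK2 pvV2 pvK4 _ (by decide) (by decide),
    pv_replace_append_clean pvK3 pvV3 pvK4 _ (by decide) (by decide),
    e4 _,
    pv_replace_append_clean pvK5 pvV5 pvV4 _ (by decide) (by decide)]

lemma pv_stepA5 (t : List Char) : pvA (pvK5 ++ t) = pvV5 ++ pvA t := by
  unfold pvA
  have e5 : ∀ X, PySem.Chars.replace (pvK5 ++ X) pvK5 pvV5
      = pvV5 ++ PySem.Chars.replace X pvK5 pvV5 := by
    intro X
    rw [pv_replace_pos pvK5 pvV5 _ (by decide) (List.prefix_append _ _), List.drop_left]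
  rw [pv_replace_append_clean pvK1 pvV1 pvK5 _ (by decide) (by decide),
    pv_replace_append_clean pvK2 pvV2 pvK5 _ (by decide) (by decide),
    pv_replace_append_clean pvK3 pvV3 pvK5 _ (by decide) (by decide),
    pv_replace_append_clean pvK4 pvV4 pvK5 _ (by decide) (by decide),
    e5 _]

lemma pv_stepAneg (c : Char) (t : List Char)
    (h1 : ¬ (pvK1 <+: c :: t)) (h2 : ¬ (pvK2 <+: c :: t)) (h3 : ¬ (pvK3 <+: c :: t))
    (h4 : ¬ (pvK4 <+: c :: t)) (h5 : ¬ (pvK5 <+: c :: t)) :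
    pvA (c :: t) = c :: pvA t := by
  have n1 := pv_replace_neg pvK1 pvV1 c t (by decide) h1
  have p2 := pv_npcr pvK1 pvV1 pvK2 (by decide) (by decide) (by decide) c t h2
  have n2 := pv_replace_neg pvK2 pvV2 c _ (by decide) p2
  have p3a := pv_npcr pvK1 pvV1 pvK3 (by decide) (by decide) (by decide) c t h3
  have p3 := pv_npcr pvK2 pvV2 pvK3 (by decide) (by decide) (by decide) c _ p3a
  have n3 := pv_replace_neg pvK3 pvV3 c _ (by decide) p3
  have p4a := pv_npcr pvK1 pvV1 pvK4 (by decide) (by decide) (by decide) c t h4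
  have p4b := pv_npcr pvK2 pvV2 pvK4 (by decide) (by decide) (by decide) c _ p4a
  have p4 := pv_npcr pvK3 pvV3 pvK4 (by decide) (by decide) (by decide) c _ p4b
  have n4 := pv_replace_neg pvK4 pvV4 c _ (by decide) p4
  have p5a := pv_npcr pvK1 pvV1 pvK5 (by decide) (by decide) (by decide) c t h5
  have p5b := pv_npcr pvK2 pvV2 pvK5 (by decide) (by decide) (by decide) c _ p5a
  have p5c := pv_npcr pvK3 pvV3 pvK5 (by decide) (by decide) (by decide) c _ p5b
  have p5 := pv_npcr pvK4 pvV4 pvK5 (by decide) (by decide) (by decide) c _ p5c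
  have n5 := pv_replace_neg pvK5 pvV5 c _ (by decide) p5
  unfold pvA
  rw [n1, n2, n3, n4, n5]

-- pvBGo computes the same list for every sufficient amount of fuel
lemma pvB_go_fuel : ∀ (n m : Nat) (l : List Char), l.length ≤ n → l.length ≤ m →
    pvBGo n l = pvBGo m l := by
  intro n
  induction n with
  | zero =>
    intro m l h1 _
    have hl : l = [] := by cases l with
      | nil => rfl
      | cons a b => simp at h1
    subst hl
    cases m <;> simp [pvBGo]
  | succ n ih =>
    intro m l h1 h2
    cases l with
    | nil => cases m <;> simp [pvBGo]
    | cons c t =>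
      cases m with
      | zero => simp at h2
      | succ m' =>
        have hl1 : t.length ≤ n := by simp at h1; omega
        have hl2 : t.length ≤ m' := by simp at h2; omega
        simp only [pvBGo]
        split_ifs
        · exact congrArg (pvV1 ++ ·) (ih m' _ (by simp; omega) (by simp; omega))
        · exact congrArg (pvV2 ++ ·) (ih m' _ (by simp; omega) (by simp; omega))
        · exact congrArg (pvV3 ++ ·) (ih m' _ (by simp; omega) (by simp; omega))
        · exact congrArg (pvV4 ++ ·) (ih m' _ (by simp; omega) (by simp; omega))
        · exact congrArg (pvV5 ++ ·) (ih m' _ (by simp; omega) (by simp; omega))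
        · exact congrArg (c :: ·) (ih m' t hl1 hl2)

-- one scan step of B
lemma pvB_step (c : Char) (t : List Char) : pvBSub (c :: t) =
    if pvK1.isPrefixOf (c :: t) then pvV1 ++ pvBSub ((c :: t).drop 14)
    else if pvK2.isPrefixOf (c :: t) then pvV2 ++ pvBSub ((c :: t).drop 16)
    else if pvK3.isPrefixOf (c :: t) then pvV3 ++ pvBSub ((c :: t).drop 18)
    else if pvK4.isPrefixOf (c :: t) then pvV4 ++ pvBSub ((c :: t).drop 16)
    else if pvK5.isPrefixOf (c :: t) then pvV5 ++ pvBSub ((c :: t).drop 21)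
    else c :: pvBSub t := by
  show pvBGo (c :: t).length (c :: t) = _
  rw [show (c :: t).length = t.length + 1 from by simp]
  simp only [pvBGo]
  split_ifs
  · exact congrArg (pvV1 ++ ·) (pvB_go_fuel t.length _ _ (by simp) le_rfl)
  · exact congrArg (pvV2 ++ ·) (pvB_go_fuel t.length _ _ (by simp) le_rfl)
  · exact congrArg (pvV3 ++ ·) (pvB_go_fuel t.length _ _ (by simp) le_rfl)
  · exact congrArg (pvV4 ++ ·) (pvB_go_fuel t.length _ _ (by simp) le_rfl)
  · exact congrArg (pvV5 ++ ·) (pvB_go_fuel t.length _ _ (by simp) le_rfl)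
  · rfl

-- ===== what B does to a block at the front of the string =====

lemma pv_stepB1 (t : List Char) :
    pvBSub (pvK1 ++ t) = pvV1 ++ pvBSub t := by
  rw [show pvK1 ++ t = 'm'::'a'::'c'::'r'::'o'::'n'::'u'::'t'::'r'::'i'::'e'::'n'::'t'::'i'::t from rfl]
  rw [pvB_step]
  rw [if_pos (show pvK1.isPrefixOf ('m'::'a'::'c'::'r'::'o'::'n'::'u'::'t'::'r'::'i'::'e'::'n'::'t'::'i'::t) = true from List.isPrefixOf_iff_prefix.mpr (List.prefix_append pvK1 t))]
  rw [show ('m'::'a'::'c'::'r'::'o'::'n'::'u'::'t'::'r'::'i'::'e'::'n'::'t'::'i'::t).drop 14 = t from rfl]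

lemma pv_stepB2 (t : List Char) (h1 : ¬ (pvK1 <+: pvK2 ++ t)) :
    pvBSub (pvK2 ++ t) = pvV2 ++ pvBSub t := by
  rw [show pvK2 ++ t = 'd'::'e'::'f'::'i'::'c'::'i'::'t'::' '::'c'::'a'::'l'::'o'::'r'::'i'::'c'::'o'::t from rfl]
  rw [pvB_step]
  rw [if_neg (show ¬ (pvK1.isPrefixOf ('d'::'e'::'f'::'i'::'c'::'i'::'t'::' '::'c'::'a'::'l'::'o'::'r'::'i'::'c'::'o'::t) = true) from fun hb => h1 (List.isPrefixOf_iff_prefix.mp hb))]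
  rw [if_pos (show pvK2.isPrefixOf ('d'::'e'::'f'::'i'::'c'::'i'::'t'::' '::'c'::'a'::'l'::'o'::'r'::'i'::'c'::'o'::t) = true from List.isPrefixOf_iff_prefix.mpr (List.prefix_append pvK2 t))]
  rw [show ('d'::'e'::'f'::'i'::'c'::'i'::'t'::' '::'c'::'a'::'l'::'o'::'r'::'i'::'c'::'o'::t).drop 16 = t from rfl]

lemma pv_stepB3 (t : List Char) (h1 : ¬ (pvK1 <+: pvK3 ++ t)) (h2 : ¬ (pvK2 <+: pvK3 ++ t)) :
    pvBSub (pvK3 ++ t) = pvV3 ++ pvBSub t := by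
  rw [show pvK3 ++ t = 'm'::'e'::'t'::'a'::'b'::'o'::'l'::'i'::'s'::'m'::'o'::' '::'b'::'a'::'s'::'a'::'l'::'e'::t from rfl]
  rw [pvB_step]
  rw [if_neg (show ¬ (pvK1.isPrefixOf ('m'::'e'::'t'::'a'::'b'::'o'::'l'::'i'::'s'::'m'::'o'::' '::'b'::'a'::'s'::'a'::'l'::'e'::t) = true) from fun hb => h1 (List.isPrefixOf_iff_prefix.mp hb))]
  rw [if_neg (show ¬ (pvK2.isPrefixOf ('m'::'e'::'t'::'a'::'b'::'o'::'l'::'i'::'s'::'m'::'o'::' '::'b'::'a'::'s'::'a'::'l'::'e'::t) = true) from fun hb => h2 (List.isPrefixOf_iff_prefix.mp hb))]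
  rw [if_pos (show pvK3.isPrefixOf ('m'::'e'::'t'::'a'::'b'::'o'::'l'::'i'::'s'::'m'::'o'::' '::'b'::'a'::'s'::'a'::'l'::'e'::t) = true from List.isPrefixOf_iff_prefix.mpr (List.prefix_append pvK3 t))]
  rw [show ('m'::'e'::'t'::'a'::'b'::'o'::'l'::'i'::'s'::'m'::'o'::' '::'b'::'a'::'s'::'a'::'l'::'e'::t).drop 18 = t from rfl]

lemma pv_stepB4 (t : List Char) (h1 : ¬ (pvK1 <+: pvK4 ++ t)) (h2 : ¬ (pvK2 <+: pvK4 ++ t)) (h3 : ¬ (pvK3 <+: pvK4 ++ t)) :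
    pvBSub (pvK4 ++ t) = pvV4 ++ pvBSub t := by
  rw [show pvK4 ++ t = 'i'::'n'::'d'::'i'::'c'::'e'::' '::'g'::'l'::'i'::'c'::'e'::'m'::'i'::'c'::'o'::t from rfl]
  rw [pvB_step]
  rw [if_neg (show ¬ (pvK1.isPrefixOf ('i'::'n'::'d'::'i'::'c'::'e'::' '::'g'::'l'::'i'::'c'::'e'::'m'::'i'::'c'::'o'::t) = true) from fun hb => h1 (List.isPrefixOf_iff_prefix.mp hb))]
  rw [if_neg (show ¬ (pvK2.isPrefixOf ('i'::'n'::'d'::'i'::'c'::'e'::' '::'g'::'l'::'i'::'c'::'e'::'m'::'i'::'c'::'o'::t) = true) from fun hb => h2 (List.isPrefixOf_iff_prefix.mp hb))]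
  rw [if_neg (show ¬ (pvK3.isPrefixOf ('i'::'n'::'d'::'i'::'c'::'e'::' '::'g'::'l'::'i'::'c'::'e'::'m'::'i'::'c'::'o'::t) = true) from fun hb => h3 (List.isPrefixOf_iff_prefix.mp hb))]
  rw [if_pos (show pvK4.isPrefixOf ('i'::'n'::'d'::'i'::'c'::'e'::' '::'g'::'l'::'i'::'c'::'e'::'m'::'i'::'c'::'o'::t) = true from List.isPrefixOf_iff_prefix.mpr (List.prefix_append pvK4 t))]
  rw [show ('i'::'n'::'d'::'i'::'c'::'e'::' '::'g'::'l'::'i'::'c'::'e'::'m'::'i'::'c'::'o'::t).drop 16 = t from rfl]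

lemma pv_stepB5 (t : List Char) (h1 : ¬ (pvK1 <+: pvK5 ++ t)) (h2 : ¬ (pvK2 <+: pvK5 ++ t)) (h3 : ¬ (pvK3 <+: pvK5 ++ t)) (h4 : ¬ (pvK4 <+: pvK5 ++ t)) :
    pvBSub (pvK5 ++ t) = pvV5 ++ pvBSub t := by
  rw [show pvK5 ++ t = 'c'::'o'::'m'::'p'::'o'::'s'::'i'::'z'::'i'::'o'::'n'::'e'::' '::'c'::'o'::'r'::'p'::'o'::'r'::'e'::'a'::t from rfl]
  rw [pvB_step]
  rw [if_neg (show ¬ (pvK1.isPrefixOf ('c'::'o'::'m'::'p'::'o'::'s'::'i'::'z'::'i'::'o'::'n'::'e'::' '::'c'::'o'::'r'::'p'::'o'::'r'::'e'::'a'::t) = true) from fun hb => h1 (List.isPrefixOf_iff_prefix.mp hb))]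
  rw [if_neg (show ¬ (pvK2.isPrefixOf ('c'::'o'::'m'::'p'::'o'::'s'::'i'::'z'::'i'::'o'::'n'::'e'::' '::'c'::'o'::'r'::'p'::'o'::'r'::'e'::'a'::t) = true) from fun hb => h2 (List.isPrefixOf_iff_prefix.mp hb))]
  rw [if_neg (show ¬ (pvK3.isPrefixOf ('c'::'o'::'m'::'p'::'o'::'s'::'i'::'z'::'i'::'o'::'n'::'e'::' '::'c'::'o'::'r'::'p'::'o'::'r'::'e'::'a'::t) = true) from fun hb => h3 (List.isPrefixOf_iff_prefix.mp hb))]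
  rw [if_neg (show ¬ (pvK4.isPrefixOf ('c'::'o'::'m'::'p'::'o'::'s'::'i'::'z'::'i'::'o'::'n'::'e'::' '::'c'::'o'::'r'::'p'::'o'::'r'::'e'::'a'::t) = true) from fun hb => h4 (List.isPrefixOf_iff_prefix.mp hb))]
  rw [if_pos (show pvK5.isPrefixOf ('c'::'o'::'m'::'p'::'o'::'s'::'i'::'z'::'i'::'o'::'n'::'e'::' '::'c'::'o'::'r'::'p'::'o'::'r'::'e'::'a'::t) = true from List.isPrefixOf_iff_prefix.mpr (List.prefix_append pvK5 t))]
  rw [show ('c'::'o'::'m'::'p'::'o'::'s'::'i'::'z'::'i'::'o'::'n'::'e'::' '::'c'::'o'::'r'::'p'::'o'::'r'::'e'::'a'::t).drop 21 = t from rfl]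

lemma pv_stepBneg (c : Char) (t : List Char)
    (h1 : ¬ (pvK1 <+: c :: t)) (h2 : ¬ (pvK2 <+: c :: t)) (h3 : ¬ (pvK3 <+: c :: t))
    (h4 : ¬ (pvK4 <+: c :: t)) (h5 : ¬ (pvK5 <+: c :: t)) :
    pvBSub (c :: t) = c :: pvBSub t := by
  rw [pvB_step,
    if_neg (show ¬ (pvK1.isPrefixOf (c :: t) = true) from fun hb => h1 (List.isPrefixOf_iff_prefix.mp hb)),
    if_neg (show ¬ (pvK2.isPrefixOf (c :: t) = true) from fun hb => h2 (List.isPrefixOf_iff_prefix.mp hb)),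
    if_neg (show ¬ (pvK3.isPrefixOf (c :: t) = true) from fun hb => h3 (List.isPrefixOf_iff_prefix.mp hb)),
    if_neg (show ¬ (pvK4.isPrefixOf (c :: t) = true) from fun hb => h4 (List.isPrefixOf_iff_prefix.mp hb)),
    if_neg (show ¬ (pvK5.isPrefixOf (c :: t) = true) from fun hb => h5 (List.isPrefixOf_iff_prefix.mp hb))]

-- ===== A = B outside the cascade region =====

lemma pv_main : ∀ (n : Nat) (cs : List Char), cs.length ≤ n →
    ¬ (pvMagic <:+: cs) → pvA cs = pvBSub cs := by
  intro n
  induction n with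
  | zero =>
    intro cs hl _
    have : cs = [] := by cases cs with
      | nil => rfl
      | cons a b => simp at hl
    subst this
    exact pv_nil_case
  | succ n ih =>
    intro cs hlen hD
    by_cases h1 : pvK1 <+: cs
    · obtain ⟨t1, rfl⟩ := h1
      have ht1 : t1.length ≤ n := by simp at hlen; omega
      have hDt : ¬ (pvMagic <:+: t1) := fun h => hD (h.trans (List.suffix_append pvK1 t1).isInfix)
      rw [pv_stepA1, pv_stepB1, ih t1 ht1 hDt]
    · by_cases h2 : pvK2 <+: cs
      · obtain ⟨t2, rfl⟩ := h2
        have ht2 : t2.length ≤ n := by simp at hlen; omega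
        have hDt : ¬ (pvMagic <:+: t2) := fun h => hD (h.trans (List.suffix_append pvK2 t2).isInfix)
        have hP : ¬ (pvP <+: t2) := by
          intro hp
          obtain ⟨r, rfl⟩ := hp
          exact hD (List.IsPrefix.isInfix ⟨r, by simp⟩)
        rw [pv_stepA2 t2 hP, pv_stepB2 t2 h1, ih t2 ht2 hDt]
      · by_cases h3 : pvK3 <+: cs
        · obtain ⟨t3, rfl⟩ := h3
          have ht3 : t3.length ≤ n := by simp at hlen; omega
          have hDt : ¬ (pvMagic <:+: t3) := fun h => hD (h.trans (List.suffix_append pvK3 t3).isInfix)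
          rw [pv_stepA3, pv_stepB3 t3 h1 h2, ih t3 ht3 hDt]
        · by_cases h4 : pvK4 <+: cs
          · obtain ⟨t4, rfl⟩ := h4
            have ht4 : t4.length ≤ n := by simp at hlen; omega
            have hDt : ¬ (pvMagic <:+: t4) := fun h => hD (h.trans (List.suffix_append pvK4 t4).isInfix)
            rw [pv_stepA4, pv_stepB4 t4 h1 h2 h3, ih t4 ht4 hDt]
          · by_cases h5 : pvK5 <+: cs
            · obtain ⟨t5, rfl⟩ := h5
              have ht5 : t5.length ≤ n := by simp at hlen; omega
              have hDt : ¬ (pvMagic <:+: t5) := fun h => hD (h.trans (List.suffix_append pvK5 t5).isInfix)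
              rw [pv_stepA5, pv_stepB5 t5 h1 h2 h3 h4, ih t5 ht5 hDt]
            · cases cs with
              | nil => exact pv_nil_case
              | cons c t =>
                have htl : t.length ≤ n := by simp at hlen; omega
                have hDt : ¬ (pvMagic <:+: t) := fun h => hD (h.trans (List.suffix_cons c t).isInfix)
                rw [pv_stepAneg c t h1 h2 h3 h4 h5, pv_stepBneg c t h1 h2 h3 h4 h5, ih t htl hDt]

-- ===== A ≠ B inside the cascade region =====

-- at a cascade site, r4 and r5 turn '…bruci' + 'ndice glicemico' into '…bruc' + the 4th value
lemma pv_cascade_core (Z : List Char) :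
    PySem.Chars.replace (PySem.Chars.replace (pvV2 ++ (pvP ++ Z)) pvK4 pvV4) pvK5 pvV5
      = (pvV2HD ++ pvV4) ++
        PySem.Chars.replace (PySem.Chars.replace Z pvK4 pvV4) pvK5 pvV5 := by
  rw [show pvV2 ++ (pvP ++ Z) = pvV2HD ++ (pvK4 ++ Z) from by
    rw [show pvV2 = pvV2HD ++ ['i'] from rfl, List.append_assoc]; rfl]
  rw [pv_replace_append_clean pvK4 pvV4 pvV2HD _ (by decide) (by decide)]
  rw [pv_replace_pos pvK4 pvV4 _ (by decide) (List.prefix_append _ _), List.drop_left]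
  rw [show pvV2HD ++ (pvV4 ++ PySem.Chars.replace Z pvK4 pvV4)
      = (pvV2HD ++ pvV4) ++ PySem.Chars.replace Z pvK4 pvV4 from (List.append_assoc _ _ _).symm]
  rw [pv_replace_append_clean pvK5 pvV5 (pvV2HD ++ pvV4) _ (by decide) (by decide)]

lemma pv_cascadeA (u : List Char) : pvA (pvMagic ++ u) = (pvV2HD ++ pvV4) ++ pvA u := by
  unfold pvA
  rw [pv_replace_append_clean pvK1 pvV1 pvMagic u (by decide) (by decide)]
  rw [show pvMagic ++ PySem.Chars.replace u pvK1 pvV1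
      = pvK2 ++ (pvP ++ PySem.Chars.replace u pvK1 pvV1) from List.append_assoc _ _ _]
  rw [pv_replace_pos pvK2 pvV2 _ (by decide) (List.prefix_append _ _), List.drop_left]
  rw [pv_replace_append_clean pvK2 pvV2 pvP _ (by decide) (by decide)]
  rw [pv_replace_append_clean pvK3 pvV3 pvV2 _ (by decide) (by decide)]
  rw [pv_replace_append_clean pvK3 pvV3 pvP _ (by decide) (by decide)]
  rw [pv_cascade_core]

lemma pv_cascade_ne (X Y : List Char) : (pvV2HD ++ pvV4) ++ X ≠ pvV2 ++ Y := by
  intro h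
  rw [show pvV2 = pvV2HD ++ ['i'] from rfl, List.append_assoc, List.append_assoc] at h
  have h2 := List.append_cancel_left h
  have := congrArg (fun l => l.headD 'x') h2
  simp at this

-- the cascade substring, if present at all, is present in the part after a clean front block
lemma pv_shift (v t : List Char)
    (hclean : ∀ j, j < v.length → ¬ (pvMagic <+: (v.drop j ++ t)))
    (h : pvMagic <:+: v ++ t) : pvMagic <:+: t := by
  obtain ⟨s, t', hst⟩ := h
  have hpre : pvMagic <+: (v ++ t).drop s.length := by
    rw [← hst, List.append_assoc, List.drop_left]
    exact ⟨t', rfl⟩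
  rw [List.drop_append] at hpre
  by_cases hs : s.length < v.length
  · exact absurd (by simpa [Nat.sub_eq_zero_of_le (le_of_lt hs)] using hpre) (hclean s.length hs)
  · have hv : v.drop s.length = [] := List.drop_eq_nil_of_le (by omega)
    rw [hv, List.nil_append] at hpre
    exact (List.IsPrefix.isInfix hpre).trans (List.drop_suffix _ _).isInfix

lemma pv_shift_clean (v t : List Char) (hc : pvClean v pvMagic)
    (h : pvMagic <:+: v ++ t) : pvMagic <:+: t := by
  refine pv_shift v t (fun j hj hm => ?_) h
  rcases pv_prefix_append_cases hm with h' | h'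
  · exact (hc j hj).1 h'
  · exact (hc j hj).2 h'

lemma pv_shift2 (t : List Char) (hP : ¬ (pvP <+: t))
    (h : pvMagic <:+: pvK2 ++ t) : pvMagic <:+: t := by
  refine pv_shift pvK2 t (fun j hj hm => ?_) h
  by_cases hj0 : j = 0
  · subst hj0
    simp only [List.drop_zero] at hm
    exact hP ((List.prefix_append_right_inj pvK2).mp hm)
  · have hcj : ∀ j, j < pvK2.length → j = 0 ∨
        (¬ (pvMagic <+: pvK2.drop j) ∧ ¬ (pvK2.drop j <+: pvMagic)) := by decide
    rcases hcj j hj with h0 | ⟨ha, hb⟩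
    · exact hj0 h0
    · rcases pv_prefix_append_cases hm with h' | h'
      · exact ha h'
      · exact hb h'

lemma pv_shift_cons (c : Char) (t : List Char) (h0 : ¬ (pvMagic <+: c :: t))
    (h : pvMagic <:+: c :: t) : pvMagic <:+: t := by
  refine pv_shift [c] t (fun j hj hm => ?_) (by simpa using h)
  have : j = 0 := by simpa using hj
  subst this
  exact h0 (by simpa using hm)

lemma pv_tight : ∀ (n : Nat) (cs : List Char), cs.length ≤ n →
    pvMagic <:+: cs → pvA cs ≠ pvBSub cs := by
  intro n
  induction n with
  | zero =>
    intro cs hl hInf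
    have : cs = [] := by cases cs with
      | nil => rfl
      | cons a b => simp at hl
    subst this
    obtain ⟨s, t', hst⟩ := hInf
    simp at hst
  | succ n ih =>
    intro cs hlen hInf
    by_cases h1 : pvK1 <+: cs
    · obtain ⟨t1, rfl⟩ := h1
      have ht1 : t1.length ≤ n := by simp at hlen; omega
      have hI : pvMagic <:+: t1 := pv_shift_clean pvK1 t1 (by decide) hInf
      rw [pv_stepA1, pv_stepB1]
      intro heq
      exact ih t1 ht1 hI (List.append_cancel_left heq)
    · by_cases h2 : pvK2 <+: cs
      · obtain ⟨t2, rfl⟩ := h2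
        have ht2 : t2.length ≤ n := by simp at hlen; omega
        by_cases hP : pvP <+: t2
        · obtain ⟨u, rfl⟩ := hP
          have hA : pvA (pvK2 ++ (pvP ++ u)) = (pvV2HD ++ pvV4) ++ pvA u := by
            rw [show pvK2 ++ (pvP ++ u) = pvMagic ++ u from (List.append_assoc _ _ _).symm]
            exact pv_cascadeA u
          rw [hA, pv_stepB2 (pvP ++ u) h1]
          exact pv_cascade_ne _ _
        · have hI : pvMagic <:+: t2 := pv_shift2 t2 hP hInf
          rw [pv_stepA2 t2 hP, pv_stepB2 t2 h1]
          intro heq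
          exact ih t2 ht2 hI (List.append_cancel_left heq)
      · by_cases h3 : pvK3 <+: cs
        · obtain ⟨t3, rfl⟩ := h3
          have ht3 : t3.length ≤ n := by simp at hlen; omega
          have hI : pvMagic <:+: t3 := pv_shift_clean pvK3 t3 (by decide) hInf
          rw [pv_stepA3, pv_stepB3 t3 h1 h2]
          intro heq
          exact ih t3 ht3 hI (List.append_cancel_left heq)
        · by_cases h4 : pvK4 <+: cs
          · obtain ⟨t4, rfl⟩ := h4
            have ht4 : t4.length ≤ n := by simp at hlen; omega
            have hI : pvMagic <:+: t4 := pv_shift_clean pvK4 t4 (by decide) hInf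
            rw [pv_stepA4, pv_stepB4 t4 h1 h2 h3]
            intro heq
            exact ih t4 ht4 hI (List.append_cancel_left heq)
          · by_cases h5 : pvK5 <+: cs
            · obtain ⟨t5, rfl⟩ := h5
              have ht5 : t5.length ≤ n := by simp at hlen; omega
              have hI : pvMagic <:+: t5 := pv_shift_clean pvK5 t5 (by decide) hInf
              rw [pv_stepA5, pv_stepB5 t5 h1 h2 h3 h4]
              intro heq
              exact ih t5 ht5 hI (List.append_cancel_left heq)
            · cases cs with
              | nil =>
                obtain ⟨s, t', hst⟩ := hInf
                simp at hst
              | cons c t =>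
                have htl : t.length ≤ n := by simp at hlen; omega
                have h0 : ¬ (pvMagic <+: c :: t) :=
                  fun hm => h2 (List.IsPrefix.trans ⟨pvP, rfl⟩ hm)
                have hI : pvMagic <:+: t := pv_shift_cons c t h0 hInf
                rw [pv_stepAneg c t h1 h2 h3 h4 h5, pv_stepBneg c t h1 h2 h3 h4 h5]
                intro heq
                injection heq with _ heq'
                exact ih t htl hI heq'

-- ===== VERDICT (by name: the statement is the Claim_ definition above) =====
theorem simplify_technical_language_py_spec : Claim_unchanged_simplify_technical_language_py := by
  unfold Claim_unchanged_simplify_technical_language_py Spec_simplify_technical_language_py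
  intro response _ hnD
  have hinf : ¬ (pvMagic <:+: response.toList) := by
    intro h
    apply hnD
    unfold D_simplify_technical_language_py
    rw [PySem.Str.isIn_iff_infix]
    rw [show "deficit caloricondice glicemico".toList = pvMagic from by decide]
    exact h
  have hA : simplify_technical_language_py response = String.ofList (pvA response.toList) := by
    simp only [simplify_technical_language_py, List.foldl, PySem.Str.replace, String.toList_ofList]
    rw [show "macronutrienti".toList = pvK1 from by decide,
      show "nutrienti principali (proteine, carboidrati, grassi)".toList = pvV1 from by decide,
      show "deficit calorico".toList = pvK2 from by decide,
      show "mangiare meno calorie di quelle che bruci".toList = pvV2 from by decide,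
      show "metabolismo basale".toList = pvK3 from by decide,
      show "energia che il corpo usa a riposo".toList = pvV3 from by decide,
      show "indice glicemico".toList = pvK4 from by decide,
      show "velocità con cui un cibo alza la glicemia".toList = pvV4 from by decide,
      show "composizione corporea".toList = pvK5 from by decide,
      show "rapporto tra muscoli e grasso".toList = pvV5 from by decide]
  rw [hA, show simplify_technical_language_py_alt response
    = String.ofList (pvBSub response.toList) from rfl,
    pv_main response.toList.length response.toList le_rfl hinf]

theorem simplify_technical_language_py_changed : Claim_changed_simplify_technical_language_py := by
  unfold Claim_changed_simplify_technical_language_py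
  refine ⟨by decide, by decide, ?_, ?_, ?_⟩
  · apply String.toList_inj.mp
    simp only [simplify_technical_language_py, List.foldl, PySem.Str.replace, String.toList_ofList]
    decide
  · apply String.toList_inj.mp
    rw [show simplify_technical_language_py_alt pvDiffWitness_simplify_technical_language_py
      = String.ofList (pvBSub pvDiffWitness_simplify_technical_language_py.toList) from rfl,
      String.toList_ofList]
    decide
  · intro h
    exact absurd (congrArg String.toList h) (by decide)

theorem simplify_technical_language_py_tight : Claim_exact_simplify_technical_language_py := by
  unfold Claim_exact_simplify_technical_language_py
  intro response _ hD heq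
  have hinf : pvMagic <:+: response.toList := by
    unfold D_simplify_technical_language_py at hD
    rw [PySem.Str.isIn_iff_infix] at hD
    rw [show "deficit caloricondice glicemico".toList = pvMagic from by decide] at hD
    exact hD
  have hA : simplify_technical_language_py response = String.ofList (pvA response.toList) := by
    simp only [simplify_technical_language_py, List.foldl, PySem.Str.replace, String.toList_ofList]
    rw [show "macronutrienti".toList = pvK1 from by decide,
      show "nutrienti principali (proteine, carboidrati, grassi)".toList = pvV1 from by decide,
      show "deficit calorico".toList = pvK2 from by decide,
      show "mangiare meno calorie di quelle che bruci".toList = pvV2 from by decide,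
      show "metabolismo basale".toList = pvK3 from by decide,
      show "energia che il corpo usa a riposo".toList = pvV3 from by decide,
      show "indice glicemico".toList = pvK4 from by decide,
      show "velocità con cui un cibo alza la glicemia".toList = pvV4 from by decide,
      show "composizione corporea".toList = pvK5 from by decide,
      show "rapporto tra muscoli e grasso".toList = pvV5 from by decide]
  rw [hA, show simplify_technical_language_py_alt response
    = String.ofList (pvBSub response.toList) from rfl] at heq
  have hlist : pvA response.toList = pvBSub response.toList := by
    have := congrArg String.toList heq
    simpa [String.toList_ofList] using this
  exact pv_tight response.toList.length response.toList le_rfl hinf hlist
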